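-- pv_equiv track=rewrite | github.com/slimh4cker/Strawberry-Diagnosis | src/motores/retornar_concordancias.py | contar_coincidencias
-- ===== SOURCE A (Python) =====
-- def contar_coincidencias(sintomas, condiciones, s_idx=0, c_idx=0, count=0):
--     """Cuenta coincidencias recursivamente entre síntomas y condiciones."""
--     # Caso base: ya recorrimos todos los síntomas
--     if s_idx >= len(sintomas):
--         return count
--
--     # Si terminamos las condiciones del síntoma actual, pasamos al siguiente síntoma
--     if c_idx >= len(condiciones):
--         return contar_coincidencias(sintomas, condiciones, s_idx + 1, 0, count)
--
--     # Obtenemos el síntoma y condición actual para comparar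
--     s = sintomas[s_idx]
--     c = condiciones[c_idx]
--
--     # Verificamos coincidencia en ambos campos
--     if s.get("hecho") == c.get("hecho") and s.get("valor") == c.get("valor"):
--         count += 1
--
--     # Llamada recursiva para siguiente condición
--     return contar_coincidencias(sintomas, condiciones, s_idx, c_idx + 1, count)
-- ===== SOURCE B (Python) =====
-- def contar_coincidencias(sintomas, condiciones, s_idx=0, c_idx=0, count=0):
--     """Cuenta coincidencias entre sintomas y condiciones con bucles anidados."""
--     for i in range(s_idx, len(sintomas)):
--         start = c_idx if i == s_idx else 0
--         for j in range(start, len(condiciones)):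
--             s = sintomas[i]
--             c = condiciones[j]
--             if s.get("hecho") == c.get("hecho") and s.get("valor") == c.get("valor"):
--                 count += 1
--     return count
-- ===== Notes on version B (the rewrite author's own statement) =====
-- stated objective: simpler
-- what changed: Replaced the index-threading recursion by a flat iterative double loop (outer over symptom rows, inner over condition indices) that increments a local counter, preserving the same visit order and .get comparisons.
import Mathlib
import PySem

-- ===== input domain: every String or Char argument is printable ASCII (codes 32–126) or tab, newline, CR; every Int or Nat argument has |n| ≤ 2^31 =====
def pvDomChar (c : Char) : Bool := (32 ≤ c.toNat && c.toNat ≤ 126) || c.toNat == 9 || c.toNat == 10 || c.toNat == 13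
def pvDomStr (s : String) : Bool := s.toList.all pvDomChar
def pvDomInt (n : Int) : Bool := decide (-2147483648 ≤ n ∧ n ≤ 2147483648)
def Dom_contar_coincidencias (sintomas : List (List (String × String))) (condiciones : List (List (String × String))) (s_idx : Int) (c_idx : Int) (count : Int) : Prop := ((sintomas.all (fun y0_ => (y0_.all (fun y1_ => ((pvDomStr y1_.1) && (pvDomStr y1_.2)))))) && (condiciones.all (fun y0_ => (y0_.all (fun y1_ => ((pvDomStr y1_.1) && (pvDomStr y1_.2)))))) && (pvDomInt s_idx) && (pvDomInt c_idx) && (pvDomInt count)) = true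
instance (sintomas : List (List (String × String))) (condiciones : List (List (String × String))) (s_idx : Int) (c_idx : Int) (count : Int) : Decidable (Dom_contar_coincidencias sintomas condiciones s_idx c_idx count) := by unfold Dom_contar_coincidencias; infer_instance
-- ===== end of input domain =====

-- B replaces A's index-threading recursion by a flat iterative nested loop over the same
-- (row, condition-index) visit order; objective: simpler (no recursion, no threaded indices).


-- ===== PORT A =====
-- literal transliteration of A's recursion; the `| _, _ => count` arm is where Python raises
-- IndexError (excluded by Pre_).
def contar_coincidencias (sintomas : List (List (String × String))) (condiciones : List (List (String × String))) (s_idx : Int) (c_idx : Int) (count : Int) : Int :=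
  if (sintomas.length : Int) ≤ s_idx then count
  else if (condiciones.length : Int) ≤ c_idx then
    contar_coincidencias sintomas condiciones (s_idx + 1) 0 count
  else
    match PySem.List.pyGet? sintomas s_idx, PySem.List.pyGet? condiciones c_idx with
    | some s, some c =>
        let count' :=
          if (PySem.Dict.mk s).get? "hecho" == (PySem.Dict.mk c).get? "hecho" &&
             (PySem.Dict.mk s).get? "valor" == (PySem.Dict.mk c).get? "valor" then count + 1 else count
        contar_coincidencias sintomas condiciones s_idx (c_idx + 1) count'
    | _, _ => count
termination_by (((sintomas.length : Int) - s_idx).toNat, ((condiciones.length : Int) - c_idx).toNat)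
decreasing_by
  · apply Prod.Lex.left; omega
  · apply Prod.Lex.right'; omega; omega

-- ===== PORT B =====
-- the inner loop body of Source B (one row `i`, conditions from `start`); `none` arms are Python's
-- IndexError points (outside Pre_).
def pvRow (sintomas : List (List (String × String))) (condiciones : List (List (String × String))) (i : Int) (start : Int) (acc : Int) : Int :=
  (PySem.List.pyRange start (condiciones.length : Int) 1).foldl (fun a j =>
    match PySem.List.pyGet? sintomas i with
    | none => a
    | some s =>
      match PySem.List.pyGet? condiciones j with
      | none => a
      | some c =>
        if (PySem.Dict.mk s).get? "hecho" == (PySem.Dict.mk c).get? "hecho" &&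
           (PySem.Dict.mk s).get? "valor" == (PySem.Dict.mk c).get? "valor" then a + 1 else a) acc

def contar_coincidencias_alt (sintomas : List (List (String × String))) (condiciones : List (List (String × String))) (s_idx : Int) (c_idx : Int) (count : Int) : Int :=
  (PySem.List.pyRange s_idx (sintomas.length : Int) 1).foldl (fun a i =>
    pvRow sintomas condiciones i (if i == s_idx then c_idx else 0) a) count

-- ===== PRECONDITION & SPEC =====
-- Pre_ is exactly the set of inputs on which the Python A returns (no IndexError): either the
-- outer index is already past the end, or the first accessed indices are in Python's wrap range.
def Pre_contar_coincidencias (sintomas : List (List (String × String))) (condiciones : List (List (String × String))) (s_idx : Int) (c_idx : Int) (count : Int) : Prop :=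
  (sintomas.length : Int) ≤ s_idx ∨
  (c_idx < (condiciones.length : Int) ∧ -(sintomas.length : Int) ≤ s_idx ∧ -(condiciones.length : Int) ≤ c_idx) ∨
  ((condiciones.length : Int) ≤ c_idx ∧ (condiciones.length = 0 ∨ -(sintomas.length : Int) ≤ s_idx + 1))
instance (sintomas : List (List (String × String))) (condiciones : List (List (String × String))) (s_idx : Int) (c_idx : Int) (count : Int) : Decidable (Pre_contar_coincidencias sintomas condiciones s_idx c_idx count) := by unfold Pre_contar_coincidencias; infer_instance

def pvWitness_contar_coincidencias : (List (List (String × String))) × (List (List (String × String))) × Int × Int × Int :=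
  ([[("hecho", "hongo"), ("valor", "si")], [("hecho", "mancha"), ("valor", "no")]],
   [[("hecho", "hongo"), ("valor", "si")]], 0, 0, 0)

def Spec_contar_coincidencias (sintomas : List (List (String × String))) (condiciones : List (List (String × String))) (s_idx : Int) (c_idx : Int) (count : Int) (out : Int) : Prop := out = contar_coincidencias_alt sintomas condiciones s_idx c_idx count
instance (sintomas : List (List (String × String))) (condiciones : List (List (String × String))) (s_idx : Int) (c_idx : Int) (count : Int) (out : Int) : Decidable (Spec_contar_coincidencias sintomas condiciones s_idx c_idx count out) := by unfold Spec_contar_coincidencias; infer_instance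

-- ===== CLAIM (what is proved, stated in full; the proofs are below) =====
def Claim_equal_contar_coincidencias : Prop := ∀ (sintomas : List (List (String × String))) (condiciones : List (List (String × String))) (s_idx : Int) (c_idx : Int) (count : Int), Dom_contar_coincidencias sintomas condiciones s_idx c_idx count → Pre_contar_coincidencias sintomas condiciones s_idx c_idx count → Spec_contar_coincidencias sintomas condiciones s_idx c_idx count (contar_coincidencias sintomas condiciones s_idx c_idx count)

-- ===== LEMMAS AND PROOFS =====

-- out-of-range access in either list yields `some` under the wrap bounds
theorem pvGetSome {α : Type} (xs : List α) (i : Int) (h1 : -(xs.length:Int) ≤ i) (h2 : i < (xs.length:Int)) :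
    ∃ v, PySem.List.pyGet? xs i = some v := by
  cases h : PySem.List.pyGet? xs i with
  | none => rw [PySem.List.pyGet?_eq_none_iff] at h; exact absurd (by simp [PySem.Raise.InRange]; omega) h
  | some v => exact ⟨v, rfl⟩

-- A's inner recursion over one row equals Source B's inner loop (pvRow), then moves to the next row
theorem row_eq (sintomas condiciones : List (List (String × String))) :
    ∀ (b : Nat) (s_idx c_idx count : Int), b = ((condiciones.length:Int) - c_idx).toNat →
    s_idx < (sintomas.length:Int) → -(sintomas.length:Int) ≤ s_idx → -(condiciones.length:Int) ≤ c_idx →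
    contar_coincidencias sintomas condiciones s_idx c_idx count
      = contar_coincidencias sintomas condiciones (s_idx + 1) 0 (pvRow sintomas condiciones s_idx c_idx count) := by
  intro b
  induction b with
  | zero =>
    intro s_idx c_idx count hb hs _ _
    rw [contar_coincidencias]
    rw [if_neg (by omega), if_pos (by omega)]
    unfold pvRow
    rw [PySem.List.pyRange_one_eq_nil (by omega)]
    rfl
  | succ b ih =>
    intro s_idx c_idx count hb hs hns hnc
    obtain ⟨sv, hsv⟩ := pvGetSome sintomas s_idx hns hs
    obtain ⟨cv, hcv⟩ := pvGetSome condiciones c_idx hnc (by omega)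
    conv_lhs => rw [contar_coincidencias]
    rw [if_neg (by omega), if_neg (by omega), hsv, hcv]
    have hrow : pvRow sintomas condiciones s_idx c_idx count
        = pvRow sintomas condiciones s_idx (c_idx + 1)
            (if ((PySem.Dict.mk sv).get? "hecho" == (PySem.Dict.mk cv).get? "hecho" && (PySem.Dict.mk sv).get? "valor" == (PySem.Dict.mk cv).get? "valor") then count + 1 else count) := by
      unfold pvRow
      rw [PySem.List.pyRange_one_cons (by omega)]
      simp only [List.foldl_cons, hsv, hcv]
    rw [hrow]
    exact ih s_idx (c_idx + 1) _ (by omega) hs hns (by omega)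

-- with no conditions A just walks the rows and returns count
theorem a_m0 (sintomas : List (List (String × String))) :
    ∀ (a : Nat) (s_idx c_idx count : Int), a = ((sintomas.length:Int) - s_idx).toNat → 0 ≤ c_idx →
    contar_coincidencias sintomas [] s_idx c_idx count = count := by
  intro a
  induction a with
  | zero =>
    intro s_idx c_idx count ha _
    rw [contar_coincidencias, if_pos (by omega)]
  | succ a ih =>
    intro s_idx c_idx count ha hc
    rw [contar_coincidencias]
    by_cases h : (sintomas.length:Int) ≤ s_idx
    · rw [if_pos h]
    · rw [if_neg h, if_pos (by simpa using hc)]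
      exact ih (s_idx + 1) 0 count (by omega) le_rfl

-- with no conditions every pvRow is the identity, so B returns count too
theorem b_m0 (sintomas : List (List (String × String))) (s_idx c_idx count : Int) (hc : 0 ≤ c_idx) :
    contar_coincidencias_alt sintomas [] s_idx c_idx count = count := by
  unfold contar_coincidencias_alt
  have h : ∀ (acc i : Int), i ∈ PySem.List.pyRange s_idx ((sintomas.length : Nat) : Int) 1 →
      (fun a i => pvRow sintomas [] i (if i == s_idx then c_idx else 0) a) acc i
        = (fun (a : Int) (_ : Int) => a) acc i := by
    intro acc i _
    simp only
    unfold pvRow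
    rw [PySem.List.pyRange_one_eq_nil (by simp only [List.length_nil, Nat.cast_zero]; split <;> omega)]
    rfl
  exact (PySem.List.foldl_congr_mem _ _ _ _ h).trans (PySem.List.foldl_ignore _ _)

-- A from (s_idx, 0) equals B's remaining all-row loop, provided some conditions exist
theorem outer_eq (sintomas condiciones : List (List (String × String))) (hm : 0 < (condiciones.length:Int)) :
    ∀ (a : Nat) (s_idx count : Int), a = ((sintomas.length:Int) - s_idx).toNat →
    -(sintomas.length:Int) ≤ s_idx →
    contar_coincidencias sintomas condiciones s_idx 0 count
      = (PySem.List.pyRange s_idx (sintomas.length:Int) 1).foldl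
          (fun acc i => pvRow sintomas condiciones i 0 acc) count := by
  intro a
  induction a with
  | zero =>
    intro s_idx count ha _
    rw [contar_coincidencias, if_pos (by omega), PySem.List.pyRange_one_eq_nil (by omega)]
    rfl
  | succ a ih =>
    intro s_idx count ha hns
    by_cases h : (sintomas.length:Int) ≤ s_idx
    · rw [contar_coincidencias, if_pos h, PySem.List.pyRange_one_eq_nil (by omega)]
      rfl
    · rw [row_eq sintomas condiciones _ s_idx 0 count rfl (by omega) hns (by omega)]
      rw [PySem.List.pyRange_one_cons (by omega), List.foldl_cons]
      exact ih (s_idx + 1) _ (by omega) (by omega)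

-- B's loop = first (partial) row, then the remaining all-row loop
theorem alt_decomp (sintomas condiciones : List (List (String × String))) (s_idx c_idx count : Int)
    (hs : s_idx < (sintomas.length:Int)) :
    contar_coincidencias_alt sintomas condiciones s_idx c_idx count
      = (PySem.List.pyRange (s_idx + 1) (sintomas.length:Int) 1).foldl
          (fun acc i => pvRow sintomas condiciones i 0 acc)
          (pvRow sintomas condiciones s_idx c_idx count) := by
  unfold contar_coincidencias_alt
  rw [PySem.List.pyRange_one_cons (by omega), List.foldl_cons]
  simp only [BEq.rfl, if_pos]
  have h : ∀ (acc i : Int), i ∈ PySem.List.pyRange (s_idx + 1) ((sintomas.length : Nat) : Int) 1 →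
      (fun a i => pvRow sintomas condiciones i (if i == s_idx then c_idx else 0) a) acc i
        = (fun acc i => pvRow sintomas condiciones i 0 acc) acc i := by
    intro acc i hi
    rw [PySem.List.mem_pyRange_one] at hi
    simp only
    have hne : (i == s_idx) = false := by simp; omega
    rw [hne]
    simp
  exact PySem.List.foldl_congr_mem _ _ _ _ h

theorem main_eq (sintomas condiciones : List (List (String × String))) (s_idx c_idx count : Int)
    (hpre : Pre_contar_coincidencias sintomas condiciones s_idx c_idx count) :
    contar_coincidencias sintomas condiciones s_idx c_idx count
      = contar_coincidencias_alt sintomas condiciones s_idx c_idx count := by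
  by_cases hdone : (sintomas.length:Int) ≤ s_idx
  · rw [contar_coincidencias, if_pos hdone]
    unfold contar_coincidencias_alt
    rw [PySem.List.pyRange_one_eq_nil (by omega)]
    rfl
  · have hs : s_idx < (sintomas.length:Int) := by omega
    rcases hpre with h | ⟨h1, h2, h3⟩ | ⟨h1, h2⟩
    · omega
    · -- first accessed cell in wrap range
      have hm : 0 < (condiciones.length:Int) := by omega
      rw [row_eq sintomas condiciones _ s_idx c_idx count rfl hs h2 h3]
      rw [outer_eq sintomas condiciones hm _ (s_idx + 1) _ rfl (by omega)]
      rw [alt_decomp sintomas condiciones s_idx c_idx count hs]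
    · -- first row skipped: c_idx past the conditions
      rcases h2 with hm0 | hsn
      · have : condiciones = [] := List.length_eq_zero_iff.mp hm0
        subst this
        rw [a_m0 sintomas _ s_idx c_idx count rfl (by simp at h1 ⊢; omega)]
        rw [b_m0 sintomas s_idx c_idx count (by simp at h1 ⊢; omega)]
      · by_cases hm : (condiciones.length:Int) = 0
        · have : condiciones = [] := List.length_eq_zero_iff.mp (by omega)
          subst this
          rw [a_m0 sintomas _ s_idx c_idx count rfl (by omega)]
          rw [b_m0 sintomas s_idx c_idx count (by omega)]
        · have hm' : 0 < (condiciones.length:Int) := by omega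
          rw [contar_coincidencias, if_neg (by omega), if_pos (by omega)]
          rw [outer_eq sintomas condiciones hm' _ (s_idx + 1) count rfl hsn]
          rw [alt_decomp sintomas condiciones s_idx c_idx count hs]
          have : pvRow sintomas condiciones s_idx c_idx count = count := by
            unfold pvRow
            rw [PySem.List.pyRange_one_eq_nil (by omega)]
            rfl
          rw [this]

-- ===== VERDICT (by name: the statement is the Claim_ definition above) =====
theorem contar_coincidencias_spec : Claim_equal_contar_coincidencias := by
  intro sintomas condiciones s_idx c_idx count _ hpre
  exact main_eq sintomas condiciones s_idx c_idx count hpre
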